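-- pv_equiv track=rewrite | github.com/enzoniko/billingModel | enhanced_diagnostic_plot.py | determine_vehicle_group
-- ===== SOURCE A (Python) =====
-- def determine_vehicle_group(sim_id: int) -> str | None:
--     """Determine which vehicle group a simulation belongs to."""
--     # Based on controle.txt mapping
--     group_ranges = {
--         'group_1': range(1, 21),
--         'group_2': range(21, 41),
--         'group_3': range(41, 61),
--         'group_4': range(61, 81),
--         'group_5': range(81, 101),
--         'group_6': range(101, 121),
--         'group_7': range(121, 141),
--         'group_8': range(141, 161),
--         'group_9': range(161, 181),
--         'group_10': range(181, 201),
--         'group_11': range(201, 221),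
--     }
--
--     for group_name, sim_range in group_ranges.items():
--         if sim_id in sim_range:
--             return group_name
--
--     return None
-- ===== SOURCE B (Python) =====
-- def determine_vehicle_group(sim_id: int) -> str | None:
--     """Determine which vehicle group a simulation belongs to."""
--     if 1 <= sim_id <= 220:
--         return f"group_{(sim_id - 1) // 20 + 1}"
--     return None
-- ===== Notes on version B (the rewrite author's own statement) =====
-- stated objective: simpler
-- what changed: Replaces the linear scan over the hard-coded per-group ranges with a closed form: a single bounds check plus integer division computes the group name directly.
import Mathlib
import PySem

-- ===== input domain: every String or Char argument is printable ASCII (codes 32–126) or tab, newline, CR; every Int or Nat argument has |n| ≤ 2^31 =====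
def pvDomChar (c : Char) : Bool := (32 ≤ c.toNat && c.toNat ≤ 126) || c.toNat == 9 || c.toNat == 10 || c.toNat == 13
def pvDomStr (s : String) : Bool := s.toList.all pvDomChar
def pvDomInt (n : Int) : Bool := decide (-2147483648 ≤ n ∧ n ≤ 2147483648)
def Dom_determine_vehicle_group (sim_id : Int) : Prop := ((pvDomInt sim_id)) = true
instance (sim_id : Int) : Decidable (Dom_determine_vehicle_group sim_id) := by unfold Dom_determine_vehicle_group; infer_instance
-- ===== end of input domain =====

-- B replaces A's scan over 11 hard-coded ranges with a bounds check and a closed-form group-number formula (simpler).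


-- ===== PORT A =====
-- A's dict of ranges, in insertion order: (name, start, stop) with membership lo <= s < hi
def pvGroupRanges : List (String × Int × Int) :=
  [("group_1", 1, 21), ("group_2", 21, 41), ("group_3", 41, 61), ("group_4", 61, 81),
   ("group_5", 81, 101), ("group_6", 101, 121), ("group_7", 121, 141), ("group_8", 141, 161),
   ("group_9", 161, 181), ("group_10", 181, 201), ("group_11", 201, 221)]

-- the 'for group_name, sim_range in group_ranges.items(): if sim_id in sim_range: return group_name' loop
def pvFindGroup : List (String × Int × Int) → Int → Option String
  | [], _ => none
  | (name, lo, hi) :: rest, s => if lo ≤ s ∧ s < hi then some name else pvFindGroup rest s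

def determine_vehicle_group (sim_id : Int) : Option String :=
  pvFindGroup pvGroupRanges sim_id

-- ===== PORT B =====
-- closed form: bounds check then arithmetic group number (simpler decomposition; no scan)
def determine_vehicle_group_alt (sim_id : Int) : Option String :=
  if 1 ≤ sim_id ∧ sim_id ≤ 220 then
    some ("group_" ++ PySem.Int.toStr (PySem.Int.floordiv (sim_id - 1) 20 + 1))
  else none

-- ===== PRECONDITION & SPEC =====
def Spec_determine_vehicle_group (sim_id : Int) (out : Option String) : Prop := out = determine_vehicle_group_alt sim_id
instance (sim_id : Int) (out : Option String) : Decidable (Spec_determine_vehicle_group sim_id out) := by unfold Spec_determine_vehicle_group; infer_instance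

-- ===== CLAIM (what is proved, stated in full; the proofs are below) =====
def Claim_equal_determine_vehicle_group : Prop := ∀ (sim_id : Int), Dom_determine_vehicle_group sim_id → Spec_determine_vehicle_group sim_id (determine_vehicle_group sim_id)

-- ===== LEMMAS AND PROOFS =====
theorem pvFloordiv_bracket (s k : Int) (h1 : 20 * k + 1 ≤ s) (h2 : s ≤ 20 * k + 20) :
    PySem.Int.floordiv (s - 1) 20 = k := by
  rw [PySem.Int.floordiv_eq_iff_of_pos (by omega : (0:Int) < 20)]
  omega

theorem pv_range_case (s k : Int) (name : String) (hk : 0 ≤ k) (hk10 : k ≤ 10)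
    (h1 : 20 * k + 1 ≤ s) (h2 : s ≤ 20 * k + 20)
    (hname : name = "group_" ++ PySem.Int.toStr (k + 1)) :
    some name = determine_vehicle_group_alt s := by
  unfold determine_vehicle_group_alt
  rw [if_pos (show 1 ≤ s ∧ s ≤ 220 by omega), pvFloordiv_bracket s k h1 h2, hname]

-- ===== VERDICT (by name: the statement is the Claim_ definition above) =====
set_option maxHeartbeats 1000000 in
theorem determine_vehicle_group_spec : Claim_equal_determine_vehicle_group := by
  intro s _
  show determine_vehicle_group s = determine_vehicle_group_alt s
  unfold determine_vehicle_group pvGroupRanges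
  simp only [pvFindGroup]
  split_ifs with h1 h2 h3 h4 h5 h6 h7 h8 h9 h10 h11
  · exact pv_range_case s 0 _ (by omega) (by omega) (by omega) (by omega) (by decide)
  · exact pv_range_case s 1 _ (by omega) (by omega) (by omega) (by omega) (by decide)
  · exact pv_range_case s 2 _ (by omega) (by omega) (by omega) (by omega) (by decide)
  · exact pv_range_case s 3 _ (by omega) (by omega) (by omega) (by omega) (by decide)
  · exact pv_range_case s 4 _ (by omega) (by omega) (by omega) (by omega) (by decide)
  · exact pv_range_case s 5 _ (by omega) (by omega) (by omega) (by omega) (by decide)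
  · exact pv_range_case s 6 _ (by omega) (by omega) (by omega) (by omega) (by decide)
  · exact pv_range_case s 7 _ (by omega) (by omega) (by omega) (by omega) (by decide)
  · exact pv_range_case s 8 _ (by omega) (by omega) (by omega) (by omega) (by decide)
  · exact pv_range_case s 9 _ (by omega) (by omega) (by omega) (by omega) (by decide)
  · exact pv_range_case s 10 _ (by omega) (by omega) (by omega) (by omega) (by decide)
  · simp only [determine_vehicle_group_alt, if_neg (by omega : ¬(1 ≤ s ∧ s ≤ 220))]
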